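-- pv_equiv track=rewrite | github.com/Angeliteh/sistema_escolar | installer/source/app/app/core/ai/interpretation/help_query/help_response_generator.py | _format_capabilities_response
-- ===== SOURCE A (Python) =====
-- from typing import Dict, Optional
--
-- def _format_capabilities_response(content: Dict) -> str:
--     """Formatea respuesta de capacidades"""
--     response = "🎯 **Capacidades del Sistema:**\n\n"
--
--     if "capacidades_principales" in content:
--         response += "**Funcionalidades principales:**\n"
--         for cap in content["capacidades_principales"]:
--             response += f"• {cap}\n"
--         response += "\n"
--
--     if "ejemplos_practicos" in content:
--         response += "**Ejemplos prácticos:**\n"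
--         for ejemplo in content["ejemplos_practicos"]:
--             response += f"• {ejemplo}\n"
--         response += "\n"
--
--     response += "¿Te gustaría que profundice en alguna funcionalidad específica?"
--     return response
-- ===== SOURCE B (Python) =====
-- def _format_capabilities_response(content):
--     """Formatea respuesta de capacidades (recursive, built back-to-front)."""
--     def bullets(items):
--         if not items:
--             return ""
--         return "• " + items[0] + "\n" + bullets(items[1:])
--
--     def section(key, title, rest):
--         if key not in content:
--             return rest
--         return title + bullets(content[key]) + "\n" + rest
--
--     footer = "¿Te gustaría que profundice en alguna funcionalidad específica?"
--     return ("🎯 **Capacidades del Sistema:**\n\n"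
--             + section("capacidades_principales", "**Funcionalidades principales:**\n",
--                       section("ejemplos_practicos", "**Ejemplos prácticos:**\n", footer)))
-- ===== Notes on version B (the rewrite author's own statement) =====
-- stated objective: alternative
-- what changed: Replaces A's forward left-to-right accumulation with += by a recursive back-to-front construction: bullets are built by structural recursion on the item list and each section is prepended around the footer via a nested helper, with no mutable accumulator or loop.
import Mathlib
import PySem

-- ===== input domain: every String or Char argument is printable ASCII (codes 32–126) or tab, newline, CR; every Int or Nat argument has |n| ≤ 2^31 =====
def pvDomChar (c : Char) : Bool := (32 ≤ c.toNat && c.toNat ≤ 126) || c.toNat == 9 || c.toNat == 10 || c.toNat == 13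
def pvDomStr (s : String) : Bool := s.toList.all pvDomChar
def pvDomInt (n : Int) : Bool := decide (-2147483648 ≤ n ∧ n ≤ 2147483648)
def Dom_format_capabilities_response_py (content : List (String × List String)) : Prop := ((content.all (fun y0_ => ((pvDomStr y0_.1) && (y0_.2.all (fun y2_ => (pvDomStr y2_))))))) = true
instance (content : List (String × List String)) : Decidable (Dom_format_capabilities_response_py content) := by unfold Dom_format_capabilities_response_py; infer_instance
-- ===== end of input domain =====

-- B replaces A's forward += accumulation with a recursive back-to-front construction
-- (bullets by structural recursion, sections prepended around the footer).

-- dict lookup (first match in insertion order), shared Python-dict semantics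
def pvLookup (content : List (String × List String)) (k : String) : Option (List String) :=
  (content.find? (fun p => p.1 == k)).map (·.2)

-- ===== PORT A =====
def format_capabilities_response_py (content : List (String × List String)) : String :=
  let response := "🎯 **Capacidades del Sistema:**\n\n"
  let response :=
    match pvLookup content "capacidades_principales" with
    | some caps =>
        (caps.foldl (fun r cap => r ++ ("• " ++ cap ++ "\n"))
          (response ++ "**Funcionalidades principales:**\n")) ++ "\n"
    | none => response
  let response :=
    match pvLookup content "ejemplos_practicos" with
    | some ejs =>
        (ejs.foldl (fun r e => r ++ ("• " ++ e ++ "\n"))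
          (response ++ "**Ejemplos prácticos:**\n")) ++ "\n"
    | none => response
  response ++ "¿Te gustaría que profundice en alguna funcionalidad específica?"

-- ===== PORT B =====
def pvBullets : List String → String
  | [] => ""
  | x :: xs => "• " ++ x ++ "\n" ++ pvBullets xs

def pvSection (content : List (String × List String)) (key title rest : String) : String :=
  match pvLookup content key with
  | some items => title ++ pvBullets items ++ "\n" ++ rest
  | none => rest

def format_capabilities_response_py_alt (content : List (String × List String)) : String :=
  "🎯 **Capacidades del Sistema:**\n\n" ++
    pvSection content "capacidades_principales" "**Funcionalidades principales:**\n"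
      (pvSection content "ejemplos_practicos" "**Ejemplos prácticos:**\n"
        "¿Te gustaría que profundice en alguna funcionalidad específica?")

-- ===== PRECONDITION & SPEC =====
def Spec_format_capabilities_response_py (content : List (String × List String)) (out : String) : Prop := out = format_capabilities_response_py_alt content
instance (content : List (String × List String)) (out : String) : Decidable (Spec_format_capabilities_response_py content out) := by unfold Spec_format_capabilities_response_py; infer_instance

-- ===== CLAIM =====
def Claim_equal_format_capabilities_response_py : Prop := ∀ (content : List (String × List String)), Dom_format_capabilities_response_py content → Spec_format_capabilities_response_py content (format_capabilities_response_py content)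

-- ===== LEMMAS AND PROOFS =====

theorem foldl_bullets (items : List String) (s : String) :
    items.foldl (fun r c => r ++ "• " ++ c ++ "\n") s = s ++ pvBullets items := by
  induction items generalizing s with
  | nil => simp [pvBullets]
  | cons x xs ih =>
      rw [List.foldl_cons, ih, pvBullets]
      simp [String.append_assoc]

-- ===== VERDICT =====
theorem format_capabilities_response_py_spec : Claim_equal_format_capabilities_response_py := by
  intro content _
  unfold Spec_format_capabilities_response_py
  unfold format_capabilities_response_py format_capabilities_response_py_alt pvSection
  cases h1 : pvLookup content "capacidades_principales" <;>
    cases h2 : pvLookup content "ejemplos_practicos" <;>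
      simp only [← String.append_assoc] <;> simp only [foldl_bullets]
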